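-- pv_equiv track=rewrite | github.com/ericc59/aria | aria/core/guidance_size_model.py | _find_family_rank
-- ===== SOURCE A (Python) =====
-- def _find_family_rank(
--     target_family: str,
--     model_ranking: list[str],
--     candidate_families: list[tuple[str, str]],
-- ) -> int:
--     """Find the rank of target_family in model_ranking, considering only
--     families that actually appear in the candidate list."""
--     present_families = {fam for _, fam in candidate_families}
--     rank = 0
--     for fam in model_ranking:
--         if fam == target_family:
--             return rank
--         if fam in present_families:
--             rank += 1
--     return rank
-- ===== SOURCE B (Python) =====
-- def _find_family_rank(
--     target_family: str,
--     model_ranking: list[str],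
--     candidate_families: list[tuple[str, str]],
-- ) -> int:
--     present = {fam for _, fam in candidate_families}
--     if target_family in model_ranking:
--         prefix = model_ranking[:model_ranking.index(target_family)]
--     else:
--         prefix = model_ranking
--     return sum(1 for fam in prefix if fam in present)
-- ===== Notes on version B (the rewrite author's own statement) =====
-- stated objective: alternative
-- what changed: Replaces A's single early-return accumulator loop by a locate-then-count decomposition: find the target's first index with .index, slice the prefix before it (or take the whole list if absent), and count prefix members present among candidate families.
import Mathlib
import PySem

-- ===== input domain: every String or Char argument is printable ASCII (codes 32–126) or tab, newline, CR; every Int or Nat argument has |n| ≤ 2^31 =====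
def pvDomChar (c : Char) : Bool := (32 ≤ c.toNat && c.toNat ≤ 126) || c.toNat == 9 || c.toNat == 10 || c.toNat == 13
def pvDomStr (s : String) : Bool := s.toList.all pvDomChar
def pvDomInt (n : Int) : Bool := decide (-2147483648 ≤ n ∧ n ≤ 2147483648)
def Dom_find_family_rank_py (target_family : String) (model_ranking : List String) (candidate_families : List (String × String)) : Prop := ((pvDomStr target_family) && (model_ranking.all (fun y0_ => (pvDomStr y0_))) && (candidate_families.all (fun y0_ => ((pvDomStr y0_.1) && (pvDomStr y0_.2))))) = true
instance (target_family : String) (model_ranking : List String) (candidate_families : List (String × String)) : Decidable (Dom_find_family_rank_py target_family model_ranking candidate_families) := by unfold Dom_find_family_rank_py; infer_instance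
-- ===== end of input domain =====

-- B replaces A's early-return accumulator loop by locate-the-target-then-count-the-prefix (alternative decomposition, same cost).

-- ===== PORT A =====
-- A's for-loop with early return: rank is the accumulator.
def find_family_rank_py_loop (target : String) (present : PySem.Set String) : List String → Int → Int
  | [], rank => rank
  | fam :: rest, rank =>
    if fam = target then rank
    else if PySem.Set.contains present fam then find_family_rank_py_loop target present rest (rank + 1)
    else find_family_rank_py_loop target present rest rank

def find_family_rank_py (target_family : String) (model_ranking : List String) (candidate_families : List (String × String)) : Int :=
  let present : PySem.Set String := PySem.Set.ofList (candidate_families.map Prod.snd)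
  find_family_rank_py_loop target_family present model_ranking 0

-- ===== PORT B =====
def find_family_rank_py_alt (target_family : String) (model_ranking : List String) (candidate_families : List (String × String)) : Int :=
  let present : PySem.Set String := PySem.Set.ofList (candidate_families.map Prod.snd)
  let pref :=
    match PySem.List.index? model_ranking target_family with
    | some i => model_ranking.take i          -- model_ranking[:idx]
    | none => model_ranking
  ((pref.countP (fun fam => PySem.Set.contains present fam) : Nat) : Int)

-- ===== PRECONDITION & SPEC =====
def Spec_find_family_rank_py (target_family : String) (model_ranking : List String) (candidate_families : List (String × String)) (out : Int) : Prop := out = find_family_rank_py_alt target_family model_ranking candidate_families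
instance (target_family : String) (model_ranking : List String) (candidate_families : List (String × String)) (out : Int) : Decidable (Spec_find_family_rank_py target_family model_ranking candidate_families out) := by unfold Spec_find_family_rank_py; infer_instance

-- ===== CLAIM (what is proved, stated in full; the proofs are below) =====
def Claim_equal_find_family_rank_py : Prop := ∀ (target_family : String) (model_ranking : List String) (candidate_families : List (String × String)), Dom_find_family_rank_py target_family model_ranking candidate_families → Spec_find_family_rank_py target_family model_ranking candidate_families (find_family_rank_py target_family model_ranking candidate_families)

-- ===== LEMMAS AND PROOFS =====
-- A's loop from accumulator r returns r plus the count of present families in the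
-- prefix of l before the first occurrence of the target (whole l if absent).
theorem find_family_rank_py_loop_eq (target : String) (present : PySem.Set String)
    (l : List String) (r : Int) :
    find_family_rank_py_loop target present l r =
      r + (((match PySem.List.index? l target with
             | some i => l.take i
             | none => l).countP (fun fam => PySem.Set.contains present fam) : Nat) : Int) := by
  induction l generalizing r with
  | nil => simp [find_family_rank_py_loop, PySem.List.index?]
  | cons fam rest ih =>
    by_cases h : fam = target
    · subst h
      rw [PySem.List.index?_cons_self]
      simp [find_family_rank_py_loop]
    · rw [PySem.List.index?_cons_of_ne rest h]
      by_cases hp : PySem.Set.contains present fam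
      · cases hidx : PySem.List.index? rest target with
        | some i =>
          simp only [find_family_rank_py_loop, if_neg h, ih, hidx,
            Option.map_some, List.take_succ_cons, List.countP_cons, hp]
          push_cast; ring
        | none =>
          simp only [find_family_rank_py_loop, if_neg h, ih, hidx,
            Option.map_none, List.countP_cons, hp]
          push_cast; ring
      · cases hidx : PySem.List.index? rest target with
        | some i =>
          simp only [find_family_rank_py_loop, if_neg h, ih, hidx,
            Option.map_some, List.take_succ_cons, List.countP_cons, hp]
          push_cast; ring
        | none =>
          simp only [find_family_rank_py_loop, if_neg h, ih, hidx,
            Option.map_none, List.countP_cons, hp]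
          push_cast; ring

-- ===== VERDICT (by name: the statement is the Claim_ definition above) =====
theorem find_family_rank_py_spec : Claim_equal_find_family_rank_py := by
  intro t mr cf _
  unfold Spec_find_family_rank_py find_family_rank_py find_family_rank_py_alt
  rw [find_family_rank_py_loop_eq]
  simp
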